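-- pv_equiv track=rewrite | github.com/sophieHerstein/Masterarbeit_DeepfakeDetectionEnsemble | utils/data_preparation/create_manipulated_images.py | _split_into_three
-- ===== SOURCE A (Python) =====
-- def _split_into_three(files):
--     """Bilder in drei gleich große Anteile unterteilen"""
--     a, b, c = [], [], []
--     for i, f in enumerate(files):
--         if i % 3 == 0:
--             a.append(f)
--         elif i % 3 == 1:
--             b.append(f)
--         else:
--             c.append(f)
--     return a, b, c
-- ===== SOURCE B (Python) =====
-- def _split_into_three(files):
--     """Bilder in drei gleich große Anteile unterteilen (chunk-wise, no per-index modulo)."""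
--     files = list(files)
--     a, b, c = [], [], []
--     for i in range(0, len(files), 3):
--         chunk = files[i:i + 3]
--         a += chunk[0:1]
--         b += chunk[1:2]
--         c += chunk[2:3]
--     return a, b, c
-- ===== Notes on version B (the rewrite author's own statement) =====
-- stated objective: alternative
-- what changed: Instead of enumerating elements and branching on i % 3, B walks the list in fixed chunks of three and distributes each chunk's slices to the three buckets in one step.
import Mathlib
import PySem

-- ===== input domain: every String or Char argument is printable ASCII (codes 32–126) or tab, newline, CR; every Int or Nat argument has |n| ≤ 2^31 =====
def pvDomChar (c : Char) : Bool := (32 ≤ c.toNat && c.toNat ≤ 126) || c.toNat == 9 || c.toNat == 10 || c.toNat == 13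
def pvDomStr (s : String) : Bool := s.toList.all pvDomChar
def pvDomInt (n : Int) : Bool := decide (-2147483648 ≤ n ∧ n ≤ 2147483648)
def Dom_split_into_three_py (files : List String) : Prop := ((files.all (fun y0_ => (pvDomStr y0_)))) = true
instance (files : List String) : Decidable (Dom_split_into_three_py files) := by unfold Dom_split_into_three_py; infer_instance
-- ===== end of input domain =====

-- B replaces A's per-index modulo branching by walking the list in fixed chunks of three
-- and distributing each chunk's slices to the three buckets (alternative decomposition, same cost).


-- ===== PORT A =====
-- for i, f in enumerate(files): branch on i % 3, append to a / b / c
def split_into_three_py (files : List String) : List String × List String × List String :=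
  (PySem.List.enumerate files).foldl
    (fun acc p =>
      if PySem.Int.mod p.1 3 = 0 then (acc.1 ++ [p.2], acc.2.1, acc.2.2)
      else if PySem.Int.mod p.1 3 = 1 then (acc.1, acc.2.1 ++ [p.2], acc.2.2)
      else (acc.1, acc.2.1, acc.2.2 ++ [p.2]))
    ([], [], [])

-- ===== PORT B =====
-- the 'for i in range(0, len(files), 3)' loop of Source B, consuming one chunk files[i:i+3] per step
-- the chunk files[i:i+3] is matched out as one, two or three leading elements so the
-- recursion is structural; each step distributes chunk[0:1], chunk[1:2], chunk[2:3]
def splitAltLoop (a b c rest : List String) : List String × List String × List String :=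
  match rest with
  | [] => (a, b, c)
  | [x] =>
    (a ++ PySem.List.slice [x] (some 0) (some 1),
     b ++ PySem.List.slice [x] (some 1) (some 2),
     c ++ PySem.List.slice [x] (some 2) (some 3))
  | [x, y] =>
    (a ++ PySem.List.slice [x, y] (some 0) (some 1),
     b ++ PySem.List.slice [x, y] (some 1) (some 2),
     c ++ PySem.List.slice [x, y] (some 2) (some 3))
  | x :: y :: z :: r =>
    splitAltLoop (a ++ PySem.List.slice [x, y, z] (some 0) (some 1))
                 (b ++ PySem.List.slice [x, y, z] (some 1) (some 2))
                 (c ++ PySem.List.slice [x, y, z] (some 2) (some 3))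
                 r

def split_into_three_py_alt (files : List String) : List String × List String × List String :=
  splitAltLoop [] [] [] files

-- ===== PRECONDITION & SPEC =====
def Spec_split_into_three_py (files : List String) (out : List String × List String × List String) : Prop := out = split_into_three_py_alt files
instance (files : List String) (out : List String × List String × List String) : Decidable (Spec_split_into_three_py files out) := by unfold Spec_split_into_three_py; infer_instance

-- ===== CLAIM (what is proved, stated in full; the proofs are below) =====
def Claim_equal_split_into_three_py : Prop := ∀ (files : List String), Dom_split_into_three_py files → Spec_split_into_three_py files (split_into_three_py files)

-- ===== LEMMAS AND PROOFS =====

-- round-robin split in cons form: first element to bucket a, rest rotated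
def rr3 (xs : List String) : List String × List String × List String :=
  match xs with
  | [] => ([], [], [])
  | x :: t => ((x :: (rr3 t).2.2, (rr3 t).1, (rr3 t).2.1))

theorem splitAltLoop_eq (rest a b c : List String) :
    splitAltLoop a b c rest = (a ++ (rr3 rest).1, b ++ (rr3 rest).2.1, c ++ (rr3 rest).2.2) := by
  fun_induction splitAltLoop a b c rest with
  | case1 a b c => simp [rr3]
  | case2 a b c x => simp [rr3, PySem.List.slice, PySem.List.clampIdx]
  | case3 a b c x y => simp [rr3, PySem.List.slice, PySem.List.clampIdx]
  | case4 a b c x y z r ih =>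
    simp [PySem.List.slice, PySem.List.clampIdx] at ih ⊢
    simp [rr3, ih]

theorem loopA_eq (xs : List String) (s : Int) (a b c : List String) (hs : 0 ≤ s) :
    List.foldl
      (fun acc p =>
        if PySem.Int.mod p.1 3 = 0 then (acc.1 ++ [p.2], acc.2.1, acc.2.2)
        else if PySem.Int.mod p.1 3 = 1 then (acc.1, acc.2.1 ++ [p.2], acc.2.2)
        else (acc.1, acc.2.1, acc.2.2 ++ [p.2]))
      (a, b, c) (PySem.List.enumerate xs s) =
    if s % 3 = 0 then (a ++ (rr3 xs).1, b ++ (rr3 xs).2.1, c ++ (rr3 xs).2.2)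
    else if s % 3 = 1 then (a ++ (rr3 xs).2.2, b ++ (rr3 xs).1, c ++ (rr3 xs).2.1)
    else (a ++ (rr3 xs).2.1, b ++ (rr3 xs).2.2, c ++ (rr3 xs).1) := by
  induction xs generalizing s a b c with
  | nil =>
    simp [PySem.List.enumerate, rr3]
  | cons x t ih =>
    have hm : PySem.Int.mod s 3 = s % 3 := by
      simp [PySem.Int.mod, Int.fmod_eq_emod]
    have h1 : (0:Int) ≤ s + 1 := by omega
    have henum : PySem.List.enumerate (x :: t) s = (s, x) :: PySem.List.enumerate t (s + 1) := rfl
    rw [henum, List.foldl_cons]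
    rcases (show s % 3 = 0 ∨ s % 3 = 1 ∨ s % 3 = 2 by omega) with h | h | h
    · have h' : (s + 1) % 3 = 1 := by omega
      rw [if_pos (by rw [hm]; exact h)]
      rw [ih (s + 1) (a ++ [x]) b c h1]
      simp [h, h', rr3]
    · have h' : (s + 1) % 3 = 2 := by omega
      rw [if_neg (by rw [hm]; omega), if_pos (by rw [hm]; exact h)]
      rw [ih (s + 1) a (b ++ [x]) c h1]
      simp [h, h', rr3]
    · have h' : (s + 1) % 3 = 0 := by omega
      rw [if_neg (by rw [hm]; omega), if_neg (by rw [hm]; omega)]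
      rw [ih (s + 1) a b (c ++ [x]) h1]
      simp [h, h', rr3]

-- ===== VERDICT (by name: the statement is the Claim_ definition above) =====
theorem split_into_three_py_spec : Claim_equal_split_into_three_py := by
  intro files _
  show split_into_three_py files = split_into_three_py_alt files
  unfold split_into_three_py split_into_three_py_alt
  rw [loopA_eq files 0 [] [] [] le_rfl, splitAltLoop_eq]
  simp
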